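-- pv_equiv track=rewrite | github.com/ucr-hpcc/hpcc_workshop_examples | scripting/top500_example_python.py | combine_country_lines
-- ===== SOURCE A (Python) =====
-- COUNTRY_IDX = 0
--
-- COUNT_IDX = 1
--
-- def combine_country_lines(in_list):
--     # out_list is the data we will return at the end.
--     # It has the same data as in_list, except that the country names will be
--     # combined into a single item when the count is the same.
--     out_list = list()
--
--     for cur_tuple in in_list:
--         if len(out_list) == 0:
--             # First item. Just append it to the empty out_list
--             out_list.append(cur_tuple)
--         else:
--             # Subsequent items, we compare the current count with the previous.
--             # If they're the same, join the names of the two countries with a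
--             # comma separator.
--             # Finally, replace the item in question with the updated country
--             # string.
--             prev_count = out_list[-1][COUNT_IDX]
--             prev_country = out_list[-1][COUNTRY_IDX]
--             if cur_tuple[COUNT_IDX] == prev_count:
--                 combined_name = ", ".join([prev_country, cur_tuple[COUNTRY_IDX]])
--                 out_list[-1] = (combined_name, prev_count)
--             else:
--                 out_list.append(cur_tuple)
--
--     return out_list
-- ===== SOURCE B (Python) =====
-- from itertools import groupby
--
-- COUNTRY_IDX = 0
-- COUNT_IDX = 1
--
-- def combine_country_lines(in_list):
--     out_list = []
--     for _, grp in groupby(in_list, key=lambda t: t[COUNT_IDX]):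
--         g = list(grp)
--         if len(g) == 1:
--             out_list.append(g[0])
--         else:
--             out_list.append((", ".join(t[COUNTRY_IDX] for t in g),
--                              g[0][COUNT_IDX]))
--     return out_list
-- ===== Notes on version B (the rewrite author's own statement) =====
-- stated objective: idiomatic
-- what changed: Replaces the accumulator that repeatedly reads and rewrites out_list[-1] with an itertools.groupby pass over maximal runs of equal count, joining each run's names in one str.join.
import Mathlib
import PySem

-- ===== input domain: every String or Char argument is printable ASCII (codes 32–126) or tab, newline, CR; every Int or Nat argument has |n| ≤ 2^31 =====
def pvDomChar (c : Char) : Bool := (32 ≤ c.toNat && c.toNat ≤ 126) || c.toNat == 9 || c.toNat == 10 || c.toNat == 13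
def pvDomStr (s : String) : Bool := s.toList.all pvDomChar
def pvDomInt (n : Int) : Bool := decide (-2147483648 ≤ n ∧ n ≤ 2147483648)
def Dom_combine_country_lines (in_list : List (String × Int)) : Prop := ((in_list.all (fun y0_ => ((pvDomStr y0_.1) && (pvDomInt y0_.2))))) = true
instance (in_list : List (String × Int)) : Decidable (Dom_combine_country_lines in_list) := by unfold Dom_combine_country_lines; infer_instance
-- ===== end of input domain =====

-- B replaces A's rewrite-the-last-accumulator loop by a groupby over maximal runs of
-- equal count, joining each run's names with one ", ".join (idiomatic, same cost).


-- ===== PORT A =====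
-- Literal port of A's loop: out_list[-1] is read via getLast?, and the in-place
-- replacement of out_list[-1] becomes dropLast ++ [new last].
def combine_country_lines (in_list : List (String × Int)) : List (String × Int) :=
  in_list.foldl (fun out_list cur_tuple =>
    match out_list.getLast? with
    | none => out_list ++ [cur_tuple]          -- len(out_list) == 0: append
    | some prev =>                             -- prev = out_list[-1]
      if cur_tuple.2 = prev.2 then
        out_list.dropLast ++ [(PySem.Str.join ", " [prev.1, cur_tuple.1], prev.2)]
      else
        out_list ++ [cur_tuple]) []

-- ===== PORT B =====
-- Port of Source B: groupby on the count field = take the maximal run of equal counts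
-- (takeWhile/dropWhile), emit the singleton unchanged or one joined tuple per run.
def combine_country_lines_alt (in_list : List (String × Int)) : List (String × Int) :=
  match in_list with
  | [] => []
  | x :: xs =>
    let run := xs.takeWhile (fun t => t.2 == x.2)
    let rest := xs.dropWhile (fun t => t.2 == x.2)
    (if run.isEmpty then x
     else (PySem.Str.join ", " ((x :: run).map Prod.fst), x.2))
      :: combine_country_lines_alt rest
termination_by in_list.length
decreasing_by
  simp only [List.length_cons]
  exact Nat.lt_succ_of_le (List.length_dropWhile_le _ _)

-- ===== PRECONDITION & SPEC =====
def Spec_combine_country_lines (in_list : List (String × Int)) (out : List (String × Int)) : Prop := out = combine_country_lines_alt in_list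
instance (in_list : List (String × Int)) (out : List (String × Int)) : Decidable (Spec_combine_country_lines in_list out) := by unfold Spec_combine_country_lines; infer_instance

-- ===== CLAIM (what is proved, stated in full; the proofs are below) =====
def Claim_equal_combine_country_lines : Prop := ∀ (in_list : List (String × Int)), Dom_combine_country_lines in_list → Spec_combine_country_lines in_list (combine_country_lines in_list)


-- ===== LEMMAS AND PROOFS =====

-- A's loop body, named for the proofs.
def pvStepA (out_list : List (String × Int)) (cur_tuple : String × Int) : List (String × Int) :=
  match out_list.getLast? with
  | none => out_list ++ [cur_tuple]
  | some prev =>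
    if cur_tuple.2 = prev.2 then
      out_list.dropLast ++ [(PySem.Str.join ", " [prev.1, cur_tuple.1], prev.2)]
    else
      out_list ++ [cur_tuple]

theorem combine_country_lines_eq_foldl (in_list : List (String × Int)) :
    combine_country_lines in_list = in_list.foldl pvStepA [] := rfl

-- the pending last element p, merged through the rest of the input
def pvMergeRun (p : String × Int) : List (String × Int) → List (String × Int)
  | [] => [p]
  | t :: ts =>
    if t.2 = p.2 then pvMergeRun (PySem.Str.join ", " [p.1, t.1], p.2) ts
    else p :: pvMergeRun t ts

theorem foldl_stepA (l : List (String × Int)) :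
    ∀ (front : List (String × Int)) (p : String × Int),
      l.foldl pvStepA (front ++ [p]) = front ++ pvMergeRun p l := by
  induction l with
  | nil => intro front p; simp [pvMergeRun]
  | cons t ts ih =>
    intro front p
    simp only [List.foldl_cons, pvMergeRun]
    by_cases h : t.2 = p.2
    · have : pvStepA (front ++ [p]) t
          = front ++ [(PySem.Str.join ", " [p.1, t.1], p.2)] := by
        simp [pvStepA, h]
      rw [this, ih, if_pos h]
    · have : pvStepA (front ++ [p]) t = (front ++ [p]) ++ [t] := by
        simp [pvStepA, h]
      rw [this, ih, if_neg h]
      simp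
    
theorem join_join (a b : String) (l : List String) :
    PySem.Str.join ", " (PySem.Str.join ", " [a, b] :: l)
      = PySem.Str.join ", " (a :: b :: l) := by
  apply String.toList_inj.mp
  simp only [PySem.Str.toList_join, List.map_cons]
  cases l with
  | nil =>
    simp [PySem.Chars.join_singleton, PySem.Chars.join_cons_cons]
  | cons c l' =>
    simp [PySem.Chars.join_cons_cons]

theorem alt_cons (x : String × Int) (xs : List (String × Int)) :
    combine_country_lines_alt (x :: xs)
      = (if (xs.takeWhile (fun t => t.2 == x.2)).isEmpty then x
         else (PySem.Str.join ", " ((x :: xs.takeWhile (fun t => t.2 == x.2)).map Prod.fst), x.2))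
        :: combine_country_lines_alt (xs.dropWhile (fun t => t.2 == x.2)) := by
  rw [combine_country_lines_alt]

theorem mergeRun_eq_alt (l : List (String × Int)) :
    ∀ p, pvMergeRun p l = combine_country_lines_alt (p :: l) := by
  induction l with
  | nil => intro p; rw [alt_cons]; simp [pvMergeRun, combine_country_lines_alt]
  | cons t ts ih =>
    intro p
    rw [pvMergeRun]
    by_cases h : t.2 = p.2
    · rw [if_pos h, ih, alt_cons, alt_cons]
      have hTake : (t :: ts).takeWhile (fun u => u.2 == p.2)
          = t :: ts.takeWhile (fun u => u.2 == p.2) := by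
        simp [h]
      have hDrop : (t :: ts).dropWhile (fun u => u.2 == p.2)
          = ts.dropWhile (fun u => u.2 == p.2) := by
        simp [h]
      rw [hTake, hDrop]
      by_cases hrun : (ts.takeWhile (fun u => u.2 == p.2)).isEmpty
      · rw [if_pos hrun]
        simp only [List.isEmpty_cons, if_neg Bool.false_ne_true, List.map_cons]
        rw [List.isEmpty_iff] at hrun
        rw [hrun]
        simp [PySem.Str.toList_join,
          ← String.toList_inj, PySem.Chars.join_cons_cons]
      · rw [if_neg hrun]
        simp only [List.isEmpty_cons, if_neg Bool.false_ne_true, List.map_cons]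
        rw [join_join]
    · have hTake : (t :: ts).takeWhile (fun u => u.2 == p.2) = [] := by
        simp [h]
      have hDrop : (t :: ts).dropWhile (fun u => u.2 == p.2) = t :: ts := by
        simp [h]
      rw [if_neg h, alt_cons p (t :: ts), hTake, hDrop, ih]
      simp

-- ===== VERDICT (by name: the statement is the Claim_ definition above) =====
theorem combine_country_lines_spec : Claim_equal_combine_country_lines := by
  intro in_list _
  show combine_country_lines in_list = combine_country_lines_alt in_list
  cases in_list with
  | nil => simp [combine_country_lines, combine_country_lines_alt]
  | cons x xs =>
    rw [combine_country_lines_eq_foldl, List.foldl_cons]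
    have h0 : pvStepA [] x = [] ++ [x] := by simp [pvStepA]
    rw [h0, foldl_stepA, mergeRun_eq_alt]
    simp
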